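-- pv_equiv track=rewrite | github.com/RobinSuxdorf/LanguageModel | tokenizer/bpe_tokenizer.py | create_new_word
-- ===== SOURCE A (Python) =====
-- from typing import Dict, List, Tuple
--
-- def create_new_word(word: List[str], pair_to_merge: Tuple[str, int]) -> List[str]:
--     """
--     Create a new word by merging a specific token pair.
--
--     Args:
--         word (List[str]): The list of tokens representing the current word.
--         pair_to_mrge (Tuple[str,int]): The character pair to merge.
--
--     Returns:
--         List[str]: The word with the specified pair merged.
--     """
--     i = 0
--     while i < len(word) - 1:
--         token_1 = word[i]
--         token_2 = word[i + 1]
--         if (token_1 + token_2 == pair_to_merge[0]):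
--             word[i] = token_1 + token_2
--             del word[i + 1]
--
--         i += 1
--
--     return word
-- ===== SOURCE B (Python) =====
-- from typing import List, Tuple
--
-- def create_new_word(word: List[str], pair_to_merge: Tuple[str, int]) -> List[str]:
--     """Find all positions whose adjacent pair concatenates to the target in one
--     comprehension, keep the left-to-right non-overlapping ones, and rebuild the
--     word from slices between the merge points (mutates `word` like the original)."""
--     target = pair_to_merge[0]
--     hits = [i for i in range(len(word) - 1) if word[i] + word[i + 1] == target]
--     if not hits:
--         return word
--     res: List[str] = []
--     prev = 0
--     last = -2
--     for i in hits:
--         if i >= last + 2: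
--             res.extend(word[prev:i])
--             res.append(target)
--             prev = i + 2
--             last = i
--     res.extend(word[prev:])
--     word[:] = res
--     return word
-- ===== Notes on version B (the rewrite author's own statement) =====
-- stated objective: faster
-- what changed: B replaces A's in-place scan with del/shift on every merge by a comprehension that collects all matching pair positions, a greedy non-overlap filter over them, and a slice-based rebuild of the word.
import Mathlib
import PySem

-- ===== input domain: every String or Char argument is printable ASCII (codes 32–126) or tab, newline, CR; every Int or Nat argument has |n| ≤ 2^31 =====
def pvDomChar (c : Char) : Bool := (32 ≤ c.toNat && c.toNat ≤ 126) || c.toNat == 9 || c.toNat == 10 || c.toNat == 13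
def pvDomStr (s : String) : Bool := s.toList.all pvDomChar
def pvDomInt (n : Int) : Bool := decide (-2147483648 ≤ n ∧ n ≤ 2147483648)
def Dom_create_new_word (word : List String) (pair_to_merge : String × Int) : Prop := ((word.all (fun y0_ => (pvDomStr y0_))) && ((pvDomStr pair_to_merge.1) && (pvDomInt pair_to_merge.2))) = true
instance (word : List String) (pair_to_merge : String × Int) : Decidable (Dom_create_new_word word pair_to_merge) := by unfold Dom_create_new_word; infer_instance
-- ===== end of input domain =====

-- B collects all matching pair positions in one comprehension, filters them greedily for
-- non-overlap, and rebuilds the word from slices, instead of A's in-place del inside the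
-- scan; return value proved equal (both Pythons also mutate `word` identically).

-- ===== PORT A =====
-- A scans with index i, and on a match overwrites word[i] and deletes word[i+1] in place.
def create_new_word_loop (word : List String) (target : String) (i : Nat) : List String :=
  if h : i + 1 < word.length then
    let token_1 := word.getD i ""
    let token_2 := word.getD (i + 1) ""
    if token_1 ++ token_2 == target then
      create_new_word_loop (((word.set i (token_1 ++ token_2)).eraseIdx (i + 1))) target (i + 1)
    else
      create_new_word_loop word target (i + 1)
  else word
termination_by word.length - i
decreasing_by
  · simp [List.length_eraseIdx, List.length_set, h]; omega
  · omega

def create_new_word (word : List String) (pair_to_merge : String × Int) : List String :=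
  create_new_word_loop word pair_to_merge.1 0

-- ===== PORT B =====
-- the comprehension [i for i in range(len(word)-1) if word[i]+word[i+1] == target]
-- (indices are in range, so getD is exact for word[i])
def create_new_word_hits (word : List String) (target : String) : List Nat :=
  (List.range (word.length - 1)).filter (fun i => word.getD i "" ++ word.getD (i + 1) "" == target)

-- the `for i in hits` loop over state (res, prev, last); the Python slices word[prev:i]
-- and word[prev:] (0 ≤ prev, i) are exactly (word.take i).drop prev / word.drop prev
def create_new_word_build (word : List String) (target : String) :
    List Nat → List String × Nat × Int → List String
  | [], (res, prev, _last) => res ++ word.drop prev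
  | i :: rest, (res, prev, last) =>
    if (i : Int) ≥ last + 2 then
      create_new_word_build word target rest
        (res ++ (word.take i).drop prev ++ [target], i + 2, (i : Int))
    else
      create_new_word_build word target rest (res, prev, last)

def create_new_word_alt (word : List String) (pair_to_merge : String × Int) : List String :=
  let target := pair_to_merge.1
  let hits := create_new_word_hits word target
  if hits = [] then word
  else create_new_word_build word target hits ([], 0, -2)

-- ===== PRECONDITION & SPEC =====
def Spec_create_new_word (word : List String) (pair_to_merge : String × Int) (out : List String) : Prop := out = create_new_word_alt word pair_to_merge
instance (word : List String) (pair_to_merge : String × Int) (out : List String) : Decidable (Spec_create_new_word word pair_to_merge out) := by unfold Spec_create_new_word; infer_instance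

-- ===== CLAIM (what is proved, stated in full; the proofs are below) =====
def Claim_equal_create_new_word : Prop := ∀ (word : List String) (pair_to_merge : String × Int), Dom_create_new_word word pair_to_merge → Spec_create_new_word word pair_to_merge (create_new_word word pair_to_merge)

-- ===== LEMMAS AND PROOFS =====

-- reference merge function both ports are related to: one left-to-right pass over the
-- token list, merging a matching adjacent pair and skipping past it
def pvMerge (target : String) (out : List String) : List String → List String
  | a :: b :: rest =>
      if a ++ b == target then pvMerge target (out ++ [target]) rest
      else pvMerge target (out ++ [a]) (b :: rest)
  | [a] => out ++ [a]
  | [] => out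

theorem pvMerge_acc (target : String) (rest : List String) : ∀ (out : List String),
    pvMerge target out rest = out ++ pvMerge target [] rest := by
  refine pvMerge.induct target
    (fun _ r => ∀ o, pvMerge target o r = o ++ pvMerge target [] r)
    ?_ ?_ ?_ ?_ [] rest
  · intro _ a b rs hm ih o
    rw [pvMerge, pvMerge, if_pos hm, if_pos hm]
    simp only [List.nil_append]
    rw [ih, ih [target]]
    simp
  · intro _ a b rs hm ih o
    rw [pvMerge, pvMerge, if_neg hm, if_neg hm]
    simp only [List.nil_append]
    rw [ih, ih [a]]
    simp
  · intro _ a o; simp [pvMerge]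
  · intro _ o; simp [pvMerge]

theorem getD_append_len (done rest : List String) (k : Nat) (d : String) :
    (done ++ rest).getD (done.length + k) d = rest.getD k d := by
  induction done with
  | nil => simp
  | cons x xs ih => simpa [Nat.succ_add] using ih

theorem set_append_len (done rest : List String) (x : String) :
    (done ++ rest).set done.length x = done ++ rest.set 0 x := by
  induction done with
  | nil => simp
  | cons y ys ih => simp [ih]

theorem eraseIdx_append_len (done rest : List String) (k : Nat) :
    (done ++ rest).eraseIdx (done.length + k) = done ++ rest.eraseIdx k := by
  induction done with
  | nil => simp
  | cons y ys ih => simpa [Nat.succ_add] using ih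

-- A-side invariant: with the first i elements finalised in `done`, A's in-place loop
-- produces `done` followed by the reference merge of the untouched suffix.
theorem loop_eq (target : String) : ∀ (rest done : List String),
    create_new_word_loop (done ++ rest) target done.length
    = done ++ pvMerge target [] rest := by
  intro rest
  refine pvMerge.induct target
    (fun _ r => ∀ done, create_new_word_loop (done ++ r) target done.length
      = done ++ pvMerge target [] r) ?_ ?_ ?_ ?_ [] rest
  · intro _ a b rs hm ih done
    rw [create_new_word_loop]
    have hl : done.length + 1 < (done ++ a :: b :: rs).length := by
      simp only [List.length_append, List.length_cons]; omega
    rw [dif_pos hl]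
    have h1 : (done ++ a :: b :: rs).getD done.length "" = a := by
      simpa using getD_append_len done (a :: b :: rs) 0 ""
    have h2 : (done ++ a :: b :: rs).getD (done.length + 1) "" = b := by
      simpa using getD_append_len done (a :: b :: rs) 1 ""
    rw [h1, h2, if_pos hm]
    have hset : (done ++ a :: b :: rs).set done.length (a ++ b) = done ++ (a ++ b) :: b :: rs := by
      simpa using set_append_len done (a :: b :: rs) (a ++ b)
    have herase : (done ++ (a ++ b) :: b :: rs).eraseIdx (done.length + 1)
        = done ++ (a ++ b) :: rs := by
      simpa using eraseIdx_append_len done ((a ++ b) :: b :: rs) 1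
    have heq : a ++ b = target := by simpa using hm
    have hthis := ih (done ++ [a ++ b])
    rw [show (done ++ [a ++ b]).length = done.length + 1 from by simp] at hthis
    rw [hset, herase, show done ++ (a ++ b) :: rs = (done ++ [a ++ b]) ++ rs from by simp, hthis,
        pvMerge, if_pos hm]
    simp only [List.nil_append]
    rw [pvMerge_acc target rs [target]]
    simp [heq]
  · intro _ a b rs hm ih done
    rw [create_new_word_loop]
    have hl : done.length + 1 < (done ++ a :: b :: rs).length := by
      simp only [List.length_append, List.length_cons]; omega
    rw [dif_pos hl]
    have h1 : (done ++ a :: b :: rs).getD done.length "" = a := by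
      simpa using getD_append_len done (a :: b :: rs) 0 ""
    have h2 : (done ++ a :: b :: rs).getD (done.length + 1) "" = b := by
      simpa using getD_append_len done (a :: b :: rs) 1 ""
    rw [h1, h2, if_neg hm]
    have hthis := ih (done ++ [a])
    rw [show (done ++ [a]).length = done.length + 1 from by simp] at hthis
    rw [show done ++ a :: b :: rs = (done ++ [a]) ++ b :: rs from by simp, hthis,
        pvMerge, if_neg hm]
    simp only [List.nil_append]
    rw [pvMerge_acc target (b :: rs) [a]]
    simp
  · intro _ a done
    rw [create_new_word_loop]
    have hl : ¬ done.length + 1 < (done ++ [a]).length := by simp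
    rw [dif_neg hl]
    simp [pvMerge]
  · intro _ done
    rw [create_new_word_loop]
    have hl : ¬ done.length + 1 < (done ++ []).length := by simp
    rw [dif_neg hl]
    simp [pvMerge]

-- ===== B-side lemmas =====

theorem getD_drop (w : List String) (q j : Nat) (d : String) :
    (w.drop q).getD j d = w.getD (q + j) d := by
  simp [List.getD, List.getElem?_drop]

theorem mem_hits (w : List String) (t : String) (i : Nat) :
    i ∈ create_new_word_hits w t ↔
      (i + 1 < w.length ∧ (w.getD i "" ++ w.getD (i + 1) "" == t) = true) := by
  simp only [create_new_word_hits, List.mem_filter, List.mem_range]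
  constructor
  · rintro ⟨h1, h2⟩; exact ⟨by omega, h2⟩
  · rintro ⟨h1, h2⟩; exact ⟨by omega, h2⟩

theorem hits_sorted (w : List String) (t : String) :
    (create_new_word_hits w t).Pairwise (· < ·) := by
  exact (List.pairwise_lt_range).filter _

-- if nothing matches, the merge pass is the identity
theorem pvMerge_noMatch (t : String) : ∀ (u : List String),
    (∀ j, j + 1 < u.length → ¬(u.getD j "" ++ u.getD (j + 1) "" == t) = true) →
    pvMerge t [] u = u := by
  refine pvMerge.induct t
    (fun _ r => (∀ j, j + 1 < r.length → ¬(r.getD j "" ++ r.getD (j + 1) "" == t) = true) →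
      pvMerge t [] r = r) ?_ ?_ ?_ ?_ []
  · intro _ a b rs hm _ h
    exact absurd hm (by simpa using h 0 (by simp))
  · intro _ a b rs hm ih h
    rw [pvMerge, if_neg hm]
    simp only [List.nil_append]
    rw [pvMerge_acc t (b :: rs) [a]]
    rw [ih (fun j hj => by simpa using h (j + 1) (by simpa using hj))]
    simp
  · intro _ a _; simp [pvMerge]
  · intro _ _; simp [pvMerge]

-- the merge pass skips over a matchless prefix
theorem pvMerge_skip (t : String) : ∀ (k : Nat) (u : List String),
    (∀ j, j + 1 < u.length → j < k → ¬(u.getD j "" ++ u.getD (j + 1) "" == t) = true) →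
    pvMerge t [] u = u.take k ++ pvMerge t [] (u.drop k) := by
  intro k
  induction k with
  | zero => intro u _; simp
  | succ k ih =>
    intro u h
    match u with
    | [] => simp [pvMerge]
    | [a] => simp [pvMerge]
    | a :: b :: v =>
      have hm : ¬(a ++ b == t) = true := by simpa using h 0 (by simp) (by omega)
      rw [pvMerge, if_neg hm]
      simp only [List.nil_append]
      rw [pvMerge_acc t (b :: v) [a]]
      rw [ih (b :: v) (fun j hj hjk => by
        simpa using h (j + 1) (by simpa using hj) (by omega))]
      simp

-- tail of a monotone filter of a strictly sorted list
theorem filter_head_tail {H : List Nat} {p : Nat → Bool}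
    (hs : H.Pairwise (· < ·)) (hmono : ∀ i j : Nat, i ≤ j → p i = true → p j = true)
    {a : Nat} {R' : List Nat} (he : H.filter p = a :: R') :
    R' = H.filter (fun i => decide (a < i)) := by
  induction H with
  | nil => simp at he
  | cons h tl ih =>
    have htl : ∀ x ∈ tl, h < x := fun x hx => (List.pairwise_cons.1 hs).1 x hx
    have hs' : tl.Pairwise (· < ·) := (List.pairwise_cons.1 hs).2
    by_cases hp : p h = true
    · rw [List.filter_cons_of_pos hp] at he
      injection he with hha htl2
      subst hha; subst htl2
      have h1 : tl.filter p = tl :=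
        List.filter_eq_self.2 (fun x hx => hmono h x (le_of_lt (htl x hx)) hp)
      have h2 : tl.filter (fun i => decide (h < i)) = tl :=
        List.filter_eq_self.2 (fun x hx => by simpa using htl x hx)
      rw [h1, List.filter_cons_of_neg (by simp), h2]
    · rw [List.filter_cons_of_neg hp] at he
      have hR' := ih hs' he
      have ha : a ∈ tl := List.mem_of_mem_filter (he ▸ List.mem_cons_self ..)
      rw [hR', List.filter_cons_of_neg (by simpa using Nat.le_of_lt (htl a ha))]

-- the central invariant of B's fold over the hit positions
theorem build_eq (w : List String) (t : String) :
    ∀ (m : Nat) (R : List Nat) (q : Nat) (res : List String) (flag : Bool),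
      2 * R.length + (if flag then 1 else 0) ≤ m →
      R = (create_new_word_hits w t).filter
            (fun i => decide (q ≤ i + (if flag then 1 else 0))) →
      create_new_word_build w t R (res, q, (q : Int) - 2) = res ++ pvMerge t [] (w.drop q) := by
  have hnil : ∀ (q : Nat) (res : List String) (last : Int),
      (∀ i ∈ create_new_word_hits w t, ¬ q ≤ i) →
      create_new_word_build w t [] (res, q, last) = res ++ pvMerge t [] (w.drop q) := by
    intro q res last hnone
    have hmm : pvMerge t [] (w.drop q) = w.drop q := by
      refine pvMerge_noMatch t (w.drop q) (fun j hj hmt => ?_)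
      have hlen : q + j + 1 < w.length := by
        have := List.length_drop (l := w) (i := q); omega
      have : q + j ∈ create_new_word_hits w t := by
        refine (mem_hits w t (q + j)).2 ⟨hlen, ?_⟩
        rw [getD_drop, getD_drop, show q + (j + 1) = q + j + 1 from by omega] at hmt
        exact hmt
      exact hnone _ this (by omega)
    rw [hmm]; rfl
  intro m
  induction m with
  | zero =>
    intro R q res flag hm hR
    match flag, R with
    | true, R => exact absurd hm (by simp)
    | false, _ :: _ => exact absurd hm (by simp)
    | false, [] =>
      refine hnil q res _ (fun i hi hqi => ?_)
      have := List.filter_eq_nil_iff.mp hR.symm i hi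
      simp at this; omega
  | succ m ih =>
    intro R q res flag hm hR
    cases flag with
    | true =>
      cases R with
      | nil =>
        refine hnil q res _ (fun i hi hqi => ?_)
        have := List.filter_eq_nil_iff.mp hR.symm i hi
        simp at this; omega
      | cons h R' =>
        have hhm : h ∈ create_new_word_hits w t ∧ q ≤ h + 1 := by
          have : h ∈ (create_new_word_hits w t).filter
              (fun i => decide (q ≤ i + (if true then 1 else 0))) := by
            rw [← hR]; exact List.mem_cons_self ..
          simpa using List.mem_filter.1 this |>.imp id (by simp)
        have hR'eq : R' = (create_new_word_hits w t).filter (fun i => decide (h < i)) :=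
          filter_head_tail (hits_sorted w t) (fun i j hij hp => by simp at hp ⊢; omega) hR.symm
        by_cases hq : q ≤ h
        · -- head already ≥ q: the two filters coincide; continue as flag = false
          have hcong : (create_new_word_hits w t).filter
                (fun i => decide (q ≤ i + (if true then 1 else 0)))
              = (create_new_word_hits w t).filter
                (fun i => decide (q ≤ i + (if false then 1 else 0))) := by
            refine List.filter_congr (fun x hx => ?_)
            by_cases hx1 : q ≤ x + 1
            · have hxm : x ∈ h :: R' := by
                rw [hR]
                exact List.mem_filter.2 ⟨hx, by simpa using hx1⟩
              have hqx : q ≤ x := by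
                rcases List.mem_cons.1 hxm with rfl | hxR'
                · exact hq
                · have := List.mem_filter.1 (hR'eq ▸ hxR') |>.2
                  simp at this; omega
              simp [hx1, hqx]
            · have : ¬ q ≤ x := by omega
              simp [hx1, this]
          exact ih (h :: R') q res false (by simp at hm ⊢ <;> omega) (by rw [hR, hcong])
        · -- head is q-1: it is skipped
          have hq1 : q = h + 1 := by omega
          rw [create_new_word_build]
          rw [if_neg (by omega)]
          have hR'eq2 : R' = (create_new_word_hits w t).filter
              (fun i => decide (q ≤ i + (if false then 1 else 0))) := by
            rw [hR'eq]
            exact List.filter_congr (fun x hx => by simp; omega)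
          exact ih R' q res false (by simp at hm ⊢ <;> omega) hR'eq2
    | false =>
      cases R with
      | nil =>
        refine hnil q res _ (fun i hi hqi => ?_)
        have := List.filter_eq_nil_iff.mp hR.symm i hi
        simp at this; omega
      | cons i0 R' =>
        have hi0 : i0 ∈ create_new_word_hits w t ∧ q ≤ i0 := by
          have : i0 ∈ (create_new_word_hits w t).filter
              (fun i => decide (q ≤ i + (if false then 1 else 0))) := by
            rw [← hR]; exact List.mem_cons_self ..
          simpa using List.mem_filter.1 this |>.imp id (by simp)
        obtain ⟨hi0H, hqi0⟩ := hi0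
        obtain ⟨hi0n, hi0m⟩ := (mem_hits w t i0).1 hi0H
        have hR'eq : R' = (create_new_word_hits w t).filter (fun i => decide (i0 < i)) :=
          filter_head_tail (hits_sorted w t) (fun i j hij hp => by simp at hp ⊢; omega) hR.symm
        rw [create_new_word_build]
        rw [if_pos (by omega)]
        have hcast : (i0 : Int) = ((i0 + 2 : Nat) : Int) - 2 := by push_cast; ring
        rw [hcast]
        have hR'eq2 : R' = (create_new_word_hits w t).filter
            (fun i => decide (i0 + 2 ≤ i + (if true then 1 else 0))) := by
          rw [hR'eq]
          exact List.filter_congr (fun x hx => by simp)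
        rw [ih R' (i0 + 2) (res ++ (w.take i0).drop q ++ [t]) true
            (by simp at hm ⊢ <;> omega) hR'eq2]
        -- now rewrite the merge of the suffix
        have hskip : pvMerge t [] (w.drop q)
            = (w.drop q).take (i0 - q) ++ pvMerge t [] ((w.drop q).drop (i0 - q)) := by
          refine pvMerge_skip t (i0 - q) (w.drop q) (fun j hj hjk => ?_)
          intro hmt
          have hlen : q + j + 1 < w.length := by
            have := List.length_drop (l := w) (i := q); omega
          have hmem : q + j ∈ create_new_word_hits w t := by
            refine (mem_hits w t (q + j)).2 ⟨hlen, ?_⟩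
            rw [getD_drop, getD_drop, show q + (j + 1) = q + j + 1 from by omega] at hmt
            exact hmt
          have : q + j ∈ i0 :: R' := by
            rw [hR]
            exact List.mem_filter.2 ⟨hmem, by simpa using hqi0.trans (by omega)⟩
          rcases List.mem_cons.1 this with heq | hmR'
          · omega
          · have := List.mem_filter.1 (hR'eq ▸ hmR') |>.2
            simp at this; omega
        have hdd : (w.drop q).drop (i0 - q) = w.drop i0 := by
          rw [List.drop_drop, show q + (i0 - q) = i0 from by omega]
        have hdt : (w.drop q).take (i0 - q) = (w.take i0).drop q := by
          rw [List.drop_take]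
        have hstep : pvMerge t [] (w.drop i0) = [t] ++ pvMerge t [] (w.drop (i0 + 2)) := by
          have e1 : w.drop i0 = w[i0] :: w.drop (i0 + 1) :=
            List.drop_eq_getElem_cons (by omega)
          have e2 : w.drop (i0 + 1) = w[i0 + 1] :: w.drop (i0 + 2) :=
            List.drop_eq_getElem_cons (by omega)
          have hmatch : (w[i0] ++ w[i0 + 1] == t) = true := by
            rw [List.getD_eq_getElem w "" (by omega : i0 < w.length),
                List.getD_eq_getElem w "" (by omega : i0 + 1 < w.length)] at hi0m
            exact hi0m
          rw [e1, e2, pvMerge, if_pos hmatch]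
          simp only [List.nil_append]
          exact pvMerge_acc t (w.drop (i0 + 2)) [t]
        rw [hskip, hdd, hdt, hstep]
        simp
  

-- ===== VERDICT (by name: the statement is the Claim_ definition above) =====
theorem create_new_word_spec : Claim_equal_create_new_word := by
  intro word pair_to_merge _
  unfold Spec_create_new_word
  have hA : create_new_word word pair_to_merge = pvMerge pair_to_merge.1 [] word := by
    simpa using loop_eq pair_to_merge.1 word []
  rw [hA]
  unfold create_new_word_alt
  by_cases hh : create_new_word_hits word pair_to_merge.1 = []
  · rw [if_pos hh]
    refine pvMerge_noMatch _ word (fun j hj hm => ?_)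
    have : j ∈ create_new_word_hits word pair_to_merge.1 :=
      (mem_hits _ _ _).2 ⟨hj, hm⟩
    simp [hh] at this
  · rw [if_neg hh]
    have hfull : create_new_word_hits word pair_to_merge.1 =
        (create_new_word_hits word pair_to_merge.1).filter
          (fun i => decide (0 ≤ i + (if true then 1 else 0))) := by
      simp
    have := build_eq word pair_to_merge.1
      (2 * (create_new_word_hits word pair_to_merge.1).length + 1)
      (create_new_word_hits word pair_to_merge.1) 0 [] true (by simp) hfull
    simpa using this.symm
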